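-- pv_equiv track=rewrite | github.com/hosseinpv1379/wireguard_backend | app/services/wireguard_service.py | _remove_existing_peer
-- ===== SOURCE A (Python) =====
-- def _remove_existing_peer(config: str, ip_address: str) -> str:
--     """حذف peer های تکراری از کانفیگ"""
--     # حذف peer های با IP یکسان
--     lines = config.split('\n')
--     cleaned_lines = []
--     skip = False
--
--     for line in lines:
--         if line.startswith('# BEGIN_PEER'):
--             skip = False
--         elif line.strip() == f'AllowedIPs = {ip_address}/32':
--             skip = True
--             continue
--
--         if not skip:
--             cleaned_lines.append(line)
--
--     return '\n'.join(cleaned_lines)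
-- ===== SOURCE B (Python) =====
-- def _remove_existing_peer(config: str, ip_address: str) -> str:
--     target = f'AllowedIPs = {ip_address}/32'
--     # group lines into blocks: a new block starts at every '# BEGIN_PEER' line
--     blocks = []
--     current = []
--     for line in config.split('\n'):
--         if line.startswith('# BEGIN_PEER'):
--             blocks.append(current)
--             current = [line]
--         else:
--             current.append(line)
--     blocks.append(current)
--     # within each block, keep lines only up to the first matching AllowedIPs line
--     out = []
--     for block in blocks:
--         for line in block:
--             if line.strip() == target:
--                 break
--             out.append(line)
--     return '\n'.join(out)
-- ===== Notes on version B (the rewrite author's own statement) =====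
-- stated objective: alternative
-- what changed: Replaces A's single stateful scan with a skip flag by a two-phase decomposition: group the lines into blocks starting at each '# BEGIN_PEER' marker, then truncate every block at its first matching 'AllowedIPs = <ip>/32' line and rejoin.
import Mathlib
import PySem

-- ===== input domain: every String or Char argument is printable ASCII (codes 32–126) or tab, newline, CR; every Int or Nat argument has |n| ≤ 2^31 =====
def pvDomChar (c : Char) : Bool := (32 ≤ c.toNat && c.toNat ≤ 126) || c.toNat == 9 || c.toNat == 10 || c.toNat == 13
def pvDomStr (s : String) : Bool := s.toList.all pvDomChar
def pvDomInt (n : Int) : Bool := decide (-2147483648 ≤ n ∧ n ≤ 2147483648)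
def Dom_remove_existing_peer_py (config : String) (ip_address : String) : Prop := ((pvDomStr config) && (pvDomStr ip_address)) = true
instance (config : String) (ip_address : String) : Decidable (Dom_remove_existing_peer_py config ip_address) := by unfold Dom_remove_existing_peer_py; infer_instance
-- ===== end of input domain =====

-- B re-decomposes A's skip-flag scan as: group lines into BEGIN_PEER-delimited blocks, then truncate each
-- block at its first matching AllowedIPs line (objective: alternative decomposition, same cost).

-- ===== PORT A =====
def remove_existing_peer_py (config : String) (ip_address : String) : String :=
  -- lines = config.split('\n'); sep "\n" ≠ "", so split? is always `some` (getD default never used)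
  let lines := (PySem.Str.split? config "\n").getD []
  let st := lines.foldl (fun (st : List String × Bool) line =>
    if PySem.Str.startswith line "# BEGIN_PEER" then
      -- skip = False, then `if not skip:` appends
      (st.1 ++ [line], false)
    else if PySem.Str.strip line == "AllowedIPs = " ++ ip_address ++ "/32" then
      -- skip = True; continue
      (st.1, true)
    else if st.2 then st else (st.1 ++ [line], st.2)) (([] : List String), false)
  PySem.Str.join "\n" st.1

-- ===== PORT B =====
-- inner `for line in block: if line.strip() == target: break; out.append(line)`
def keepBlockB (target : String) : List String → List String
  | [] => []
  | l :: ls => if PySem.Str.strip l == target then [] else l :: keepBlockB target ls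

def remove_existing_peer_py_alt (config : String) (ip_address : String) : String :=
  let target := "AllowedIPs = " ++ ip_address ++ "/32"
  -- group lines into blocks, a new block starting at each '# BEGIN_PEER' line
  let p := ((PySem.Str.split? config "\n").getD []).foldl
    (fun (p : List (List String) × List String) line =>
      if PySem.Str.startswith line "# BEGIN_PEER" then (p.1 ++ [p.2], [line])
      else (p.1, p.2 ++ [line]))
    (([] : List (List String)), ([] : List String))
  let blocks := p.1 ++ [p.2]
  let out := blocks.foldl (fun out block => out ++ keepBlockB target block) []
  PySem.Str.join "\n" out

-- ===== PRECONDITION & SPEC =====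
def Spec_remove_existing_peer_py (config : String) (ip_address : String) (out : String) : Prop := out = remove_existing_peer_py_alt config ip_address
instance (config : String) (ip_address : String) (out : String) : Decidable (Spec_remove_existing_peer_py config ip_address out) := by unfold Spec_remove_existing_peer_py; infer_instance

-- ===== CLAIM (what is proved, stated in full; the proofs are below) =====
def Claim_equal_remove_existing_peer_py : Prop := ∀ (config : String) (ip_address : String), Dom_remove_existing_peer_py config ip_address → Spec_remove_existing_peer_py config ip_address (remove_existing_peer_py config ip_address)

-- ===== LEMMAS AND PROOFS =====

-- specification of A's loop as a structural recursion on the line list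
def loopA (tgt : String) : List String → Bool → List String
  | [], _ => []
  | l :: ls, s =>
    if PySem.Str.startswith l "# BEGIN_PEER" then l :: loopA tgt ls false
    else if PySem.Str.strip l == tgt then loopA tgt ls true
    else if s then loopA tgt ls true else l :: loopA tgt ls false

-- what B computes from the not-yet-closed current block `c` plus the remaining lines
def keepAll (tgt : String) : List String → List String → List String
  | [], c => keepBlockB tgt c
  | l :: ls, c =>
    if PySem.Str.startswith l "# BEGIN_PEER" then keepBlockB tgt c ++ keepAll tgt ls [l]
    else keepAll tgt ls (c ++ [l])

theorem keepBlockB_of_no_match (tgt : String) (c : List String)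
    (h : c.any (fun l => PySem.Str.strip l == tgt) = false) : keepBlockB tgt c = c := by
  induction c with
  | nil => rfl
  | cons x xs ih =>
    simp only [List.any_cons, Bool.or_eq_false_iff] at h
    simp [keepBlockB, h.1, ih h.2]

theorem keepBlockB_append (tgt : String) (c d : List String) :
    keepBlockB tgt (c ++ d) =
      if c.any (fun l => PySem.Str.strip l == tgt) then keepBlockB tgt c else c ++ keepBlockB tgt d := by
  induction c with
  | nil => simp
  | cons x xs ih =>
    by_cases hx : (PySem.Str.strip x == tgt) = true
    · simp [keepBlockB, hx]
    · simp only [List.cons_append, keepBlockB, hx, List.any_cons, Bool.false_or, ih]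
      split_ifs <;> simp_all

-- a '# BEGIN_PEER' line can never satisfy the AllowedIPs test: its stripped form starts with '#'
theorem beg_not_mat (ip l : String)
    (h : PySem.Str.startswith l "# BEGIN_PEER" = true) :
    (PySem.Str.strip l == "AllowedIPs = " ++ ip ++ "/32") = false := by
  apply beq_eq_false_iff_ne.2
  intro heq
  have hpre : ("# BEGIN_PEER".toList) <+: l.toList := by
    rw [PySem.Str.startswith_eq] at h
    exact (PySem.Chars.startswith_iff _ _).1 h
  obtain ⟨t, ht⟩ := hpre
  have hl : l.toList = '#' :: ("# BEGIN_PEER".toList.tail ++ t) := by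
    rw [← ht]; rfl
  have hstrip : (PySem.Str.strip l).toList = PySem.Chars.strip l.toList := PySem.Str.toList_strip l
  set u : List Char := "# BEGIN_PEER".toList.tail ++ t with hu
  have hls : PySem.Chars.lstrip l.toList = '#' :: u := by
    rw [hl, PySem.Chars.lstrip]
    simp [show PySem.Chars.isspace '#' = false by decide]
  set d : List Char := List.dropWhile PySem.Chars.isspace (u.reverse ++ ['#']) with hd
  have hrs : PySem.Chars.strip l.toList = d.reverse := by
    rw [PySem.Chars.strip, hls, PySem.Chars.rstrip, hd]
    simp
  have hdne : d ≠ [] := by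
    intro h0
    rw [hd] at h0
    have := List.dropWhile_eq_nil_iff.1 h0 '#' (by simp)
    exact absurd this (by decide)
  have hsuf : d <:+ (u.reverse ++ ['#']) := by rw [hd]; exact List.dropWhile_suffix _
  have hpre2 : d.reverse <+: ('#' :: u) := by
    have := hsuf.reverse
    simpa using this
  have hhead : d.reverse.head? = some '#' := by
    obtain ⟨r, hr⟩ := hpre2
    cases hdr : d.reverse with
    | nil => exact absurd (by simpa using hdr) hdne
    | cons a as =>
      rw [hdr] at hr
      simp only [List.cons_append] at hr
      injection hr with h1 _
      rw [h1]
      rfl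
  have h1 : (PySem.Str.strip l).toList.head? = some '#' := by
    rw [hstrip, hrs]; exact hhead
  rw [heq] at h1
  simp [String.toList_append] at h1

-- INVARIANT: B's truncate-blocks view of (current block c, remaining lines ls) equals
-- the kept prefix of c followed by A's scan with skip = "c already contains a match"
theorem keepAll_eq (ip : String) :
    ∀ (ls c : List String),
      keepAll ("AllowedIPs = " ++ ip ++ "/32") ls c =
        keepBlockB ("AllowedIPs = " ++ ip ++ "/32") c ++
          loopA ("AllowedIPs = " ++ ip ++ "/32") ls
            (c.any (fun l => PySem.Str.strip l == "AllowedIPs = " ++ ip ++ "/32")) := by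
  intro ls
  induction ls with
  | nil => intro c; simp [keepAll, loopA]
  | cons l ls ih =>
    intro c
    by_cases hb : PySem.Str.startswith l "# BEGIN_PEER" = true
    · have hm := beg_not_mat ip l hb
      simp only [keepAll, hb, if_true, ih [l], loopA]
      simp [keepBlockB, hm]
    · simp only [keepAll, hb, ih (c ++ [l]), loopA,
        keepBlockB_append, List.any_append, List.any_cons, List.any_nil]
      by_cases hc : (c.any (fun l => PySem.Str.strip l == "AllowedIPs = " ++ ip ++ "/32")) = true
      · by_cases hm : (PySem.Str.strip l == "AllowedIPs = " ++ ip ++ "/32") = true <;>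
          simp [hc, hm]
      · have hkc := keepBlockB_of_no_match ("AllowedIPs = " ++ ip ++ "/32") c
          (Bool.eq_false_iff.2 hc)
        by_cases hm : (PySem.Str.strip l == "AllowedIPs = " ++ ip ++ "/32") = true <;>
          simp [hc, hm, hkc, keepBlockB]

theorem foldA_eq (ip : String) :
    ∀ (ls : List String) (acc : List String) (s : Bool),
      (ls.foldl (fun (st : List String × Bool) line =>
        if PySem.Str.startswith line "# BEGIN_PEER" then
          (st.1 ++ [line], false)
        else if PySem.Str.strip line == "AllowedIPs = " ++ ip ++ "/32" then
          (st.1, true)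
        else if st.2 then st else (st.1 ++ [line], st.2)) (acc, s)).1 =
      acc ++ loopA ("AllowedIPs = " ++ ip ++ "/32") ls s := by
  intro ls
  induction ls with
  | nil => intro acc s; simp [loopA]
  | cons l ls ih =>
    intro acc s
    rw [List.foldl_cons]
    by_cases hb : PySem.Str.startswith l "# BEGIN_PEER" = true
    · rw [if_pos hb, ih, loopA, if_pos hb]
      simp
    · rw [if_neg hb]
      by_cases hm : (PySem.Str.strip l == "AllowedIPs = " ++ ip ++ "/32") = true
      · rw [if_pos hm, ih, loopA, if_neg hb, if_pos hm]
      · rw [if_neg hm]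
        cases s with
        | false =>
          rw [if_neg (by simp), ih, loopA, if_neg hb, if_neg hm, if_neg (by simp)]
          simp
        | true =>
          rw [if_pos rfl, ih, loopA, if_neg hb, if_neg hm, if_pos rfl]

theorem foldB_eq (ip : String) :
    ∀ (ls : List String) (bs : List (List String)) (c : List String),
      (let p := ls.foldl (fun (p : List (List String) × List String) line =>
          if PySem.Str.startswith line "# BEGIN_PEER" then (p.1 ++ [p.2], [line])
          else (p.1, p.2 ++ [line])) (bs, c)
       (p.1 ++ [p.2]).flatMap (keepBlockB ("AllowedIPs = " ++ ip ++ "/32"))) =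
      bs.flatMap (keepBlockB ("AllowedIPs = " ++ ip ++ "/32")) ++
        keepAll ("AllowedIPs = " ++ ip ++ "/32") ls c := by
  intro ls
  induction ls with
  | nil => intro bs c; simp [keepAll]
  | cons l ls ih =>
    intro bs c
    simp only [List.foldl_cons]
    by_cases hb : PySem.Str.startswith l "# BEGIN_PEER" = true
    · rw [if_pos hb, ih, keepAll, if_pos hb]
      simp [List.flatMap_append]
    · rw [if_neg hb, ih, keepAll, if_neg hb]

-- ===== VERDICT (by name: the statement is the Claim_ definition above) =====
theorem remove_existing_peer_py_spec : Claim_equal_remove_existing_peer_py := by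
  intro config ip _
  unfold Spec_remove_existing_peer_py remove_existing_peer_py remove_existing_peer_py_alt
  simp only [PySem.List.foldl_append_eq_flatMap, List.nil_append]
  rw [foldA_eq, foldB_eq]
  simp [keepAll_eq, keepBlockB]
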